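-- pv_equiv track=rewrite | github.com/magggieli/stones | stones.py | format_pile
-- ===== SOURCE A (Python) =====
-- import math
--
-- def format_pile(stones_in_pile: int) -> str:
--   """Generates a pretty string version of the pile of stones
--
--       Args:
--         stones: Total number of stones in the pile
--
--       Returns:
--         A single string representing the pile of stones, where '*' indicates a single stone
--             - The returned string should begin with a newline ('\n')
--             - A maximum row length determined by the ceiling of the square root number of stones in the pile
--             - '\n' should be used to indicate line breaks
--             - The string should end with a text-based summary of the number of stones in the pile
--
--         Examples
--         --------
--         >>>format_pile(1)
--         "\n*\nThere is 1 stone in the pile."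
--
--         >>>format_pile(7)
--         "\n***\n***\n*\nThere are 7 stones in the pile."
--   """
--   row_length = math.ceil(math.sqrt(stones_in_pile))
--   pile_string = ""
--   stones_remaining = stones_in_pile
--
--   while stones_remaining > 0:
--     stones_in_row = min(row_length, stones_remaining)
--     row_string = "*" * stones_in_row
--     pile_string += row_string + "\n"
--     stones_remaining -= stones_in_row
--
--   summary = f"There {'is' if stones_in_pile == 1 else 'are'} {stones_in_pile} stone{'s' if stones_in_pile != 1 else ''} in the pile."
--   return "\n" + pile_string + summary
-- ===== SOURCE B (Python) =====
-- import math
--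
-- def format_pile(stones_in_pile: int) -> str:
--     row_length = math.ceil(math.sqrt(stones_in_pile))
--     if stones_in_pile == 0:
--         rows = []
--     else:
--         full, rem = divmod(stones_in_pile, row_length)
--         rows = ["*" * row_length] * full
--         if rem:
--             rows.append("*" * rem)
--     body = "".join(row + "\n" for row in rows)
--     summary = f"There {'is' if stones_in_pile == 1 else 'are'} {stones_in_pile} stone{'s' if stones_in_pile != 1 else ''} in the pile."
--     return "\n" + body + summary
-- ===== Notes on version B (the rewrite author's own statement) =====
-- stated objective: faster
-- what changed: Replaces the subtract-one-row-per-iteration while loop and repeated string concatenation with a single divmod that yields the number of full rows and the remainder directly, building the rows by list replication and one join.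
import Mathlib
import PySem

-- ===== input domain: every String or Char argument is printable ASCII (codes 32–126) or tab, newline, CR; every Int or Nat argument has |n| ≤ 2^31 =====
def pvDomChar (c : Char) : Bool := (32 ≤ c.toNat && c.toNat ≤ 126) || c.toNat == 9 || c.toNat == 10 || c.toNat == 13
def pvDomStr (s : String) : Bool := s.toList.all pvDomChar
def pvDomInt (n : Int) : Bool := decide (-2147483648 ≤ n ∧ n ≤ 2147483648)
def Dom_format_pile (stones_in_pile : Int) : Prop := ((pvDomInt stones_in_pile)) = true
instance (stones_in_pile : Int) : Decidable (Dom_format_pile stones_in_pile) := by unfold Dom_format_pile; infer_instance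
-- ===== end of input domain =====

-- B replaces A's subtract-a-row-per-iteration while loop with one divmod giving the full-row count and remainder directly (objective: faster, constant-factor).

-- ===== PORT A =====
-- math.ceil(math.sqrt(n)) ported by hand: exact for 0 ≤ n ≤ 2^31 (doubles represent these
-- integers exactly and sqrt is correctly rounded there); for n < 0 Python raises ValueError
-- (excluded by Pre_format_pile), here we return 0.
def pvCeilSqrt (n : Int) : Int :=
  if Nat.sqrt n.toNat * Nat.sqrt n.toNat == n.toNat then (Nat.sqrt n.toNat : Int)
  else ((Nat.sqrt n.toNat : Int) + 1)

-- the f-string summary line, identical in Source A and Source B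
def pvSummary (n : Int) : List Char :=
  "There ".toList ++ (if n == 1 then "is" else "are").toList ++ " ".toList
    ++ PySem.Int.toChars n ++ " stone".toList
    ++ (if n != 1 then "s" else "").toList ++ " in the pile.".toList

-- A's while loop (stones_in_row = min(row_length, stones_remaining) inlined);
-- fuel = stones_in_pile.toNat suffices since each iteration removes ≥ 1 stone
def pvLoopA : Nat → Int → Int → List Char
  | 0, _, _ => []
  | fuel + 1, rowLength, remaining =>
    if remaining > 0 then
      (List.replicate (min rowLength remaining).toNat '*' ++ ['\n'])
        ++ pvLoopA fuel rowLength (remaining - min rowLength remaining)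
    else []

def format_pile (stones_in_pile : Int) : String :=
  String.ofList ('\n' ::
    (pvLoopA stones_in_pile.toNat (pvCeilSqrt stones_in_pile) stones_in_pile
      ++ pvSummary stones_in_pile))

-- ===== PORT B =====
def pvRowsB (n rowLength : Int) : List (List Char) :=
  if n == 0 then []
  else
    match PySem.Int.divmod? n rowLength with
    | some (full, rem) =>
        List.replicate full.toNat (List.replicate rowLength.toNat '*')
          ++ (if rem ≠ 0 then [List.replicate rem.toNat '*'] else [])
    | none => []   -- unreachable inside Pre_: rowLength ≥ 1 when n ≥ 1

def format_pile_alt (stones_in_pile : Int) : String :=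
  String.ofList ('\n' ::
    (((pvRowsB stones_in_pile (pvCeilSqrt stones_in_pile)).map (· ++ ['\n'])).flatten
      ++ pvSummary stones_in_pile))

-- ===== PRECONDITION & SPEC =====
-- math.sqrt raises ValueError on negative input: both programs raise there.
def Pre_format_pile (stones_in_pile : Int) : Prop := 0 ≤ stones_in_pile
instance (stones_in_pile : Int) : Decidable (Pre_format_pile stones_in_pile) := by unfold Pre_format_pile; infer_instance
def pvWitness_format_pile : Int := (7)

def Spec_format_pile (stones_in_pile : Int) (out : String) : Prop := out = format_pile_alt stones_in_pile
instance (stones_in_pile : Int) (out : String) : Decidable (Spec_format_pile stones_in_pile out) := by unfold Spec_format_pile; infer_instance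

-- ===== CLAIM (what is proved, stated in full; the proofs are below) =====
def Claim_equal_format_pile : Prop := ∀ (stones_in_pile : Int), Dom_format_pile stones_in_pile → Pre_format_pile stones_in_pile → Spec_format_pile stones_in_pile (format_pile stones_in_pile)

-- ===== LEMMAS AND PROOFS =====

-- A's loop, characterised in Nat: r stones with rows of length L ≥ 1 give r / L full rows
-- and one row of r % L stones when the remainder is nonzero.
lemma pvLoopA_eq (fuel L r : Nat) (hL : 1 ≤ L) (hf : r ≤ fuel) :
    pvLoopA fuel (L : Int) (r : Int) =
      (List.replicate (r / L) (List.replicate L '*' ++ ['\n'])).flatten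
        ++ (if r % L ≠ 0 then List.replicate (r % L) '*' ++ ['\n'] else []) := by
  induction fuel generalizing r with
  | zero =>
    have : r = 0 := Nat.le_zero.mp hf
    subst this
    simp [pvLoopA]
  | succ fuel ih =>
    by_cases hr : r = 0
    · subst hr
      simp [pvLoopA]
    · have hrpos : 0 < r := Nat.pos_of_ne_zero hr
      by_cases hLe : L ≤ r
      · -- full row
        have hmin : min (L : Int) (r : Int) = (L : Int) := min_eq_left (by exact_mod_cast hLe)
        have hsub : (r : Int) - (L : Int) = ((r - L : Nat) : Int) := by
          push_cast [Nat.cast_sub hLe]; ring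
        rw [pvLoopA, if_pos (by exact_mod_cast hrpos), hmin, hsub, Int.toNat_natCast,
          ih (r - L) (by omega)]
        have hdiv : r / L = (r - L) / L + 1 := by
          rw [Nat.div_eq_sub_div (by omega) hLe]
        have hmod : r % L = (r - L) % L := (Nat.mod_eq_sub_mod hLe)
        rw [hdiv, ← hmod, List.replicate_succ, List.flatten_cons]
        simp [List.append_assoc]
      · -- last, partial row
        have hlt : r < L := Nat.lt_of_not_le hLe
        have hmin : min (L : Int) (r : Int) = (r : Int) := min_eq_right (by exact_mod_cast hlt.le)
        rw [pvLoopA, if_pos (by exact_mod_cast hrpos), hmin, Int.toNat_natCast, sub_self]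
        have hzero : pvLoopA fuel (L : Int) 0 = [] := by
          cases fuel <;> simp [pvLoopA]
        rw [hzero, Nat.div_eq_of_lt hlt, Nat.mod_eq_of_lt hlt]
        simp [hr]

-- B's rows, flattened with newlines, in the same Nat form
lemma pvRowsB_eq (L r : Nat) (hL : 1 ≤ L) (hr : r ≠ 0) :
    ((pvRowsB (r : Int) (L : Int)).map (· ++ ['\n'])).flatten =
      (List.replicate (r / L) (List.replicate L '*' ++ ['\n'])).flatten
        ++ (if r % L ≠ 0 then List.replicate (r % L) '*' ++ ['\n'] else []) := by
  have hLne : L ≠ 0 := by omega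
  have hdm : PySem.Int.divmod? (r : Int) (L : Int) = some (((r / L : Nat) : Int), ((r % L : Nat) : Int)) := by
    simp [PySem.Int.divmod?, hLne, Int.fdiv_eq_ediv, Int.fmod_eq_emod]
  unfold pvRowsB
  rw [if_neg (by simp [hr]), hdm]
  simp only [Int.toNat_natCast, ne_eq, Nat.cast_eq_zero, List.map_append, List.map_replicate,
    List.flatten_append]
  by_cases h : r % L = 0
  · simp [h]
  · simp [h]

lemma pvCeilSqrt_pos (n : Int) (hn : 1 ≤ n) : 1 ≤ pvCeilSqrt n := by
  unfold pvCeilSqrt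
  have h1 : 1 ≤ n.toNat := by omega
  split
  · rename_i h
    have := Nat.sqrt_pos.mpr h1
    exact_mod_cast this
  · have : 0 ≤ (Nat.sqrt n.toNat : Int) := by positivity
    omega

-- ===== VERDICT (by name: the statement is the Claim_ definition above) =====
theorem format_pile_spec : Claim_equal_format_pile := by
  intro n _ hpre
  unfold Spec_format_pile format_pile format_pile_alt
  by_cases h0 : n = 0
  · subst h0; rfl
  · have hn1 : 1 ≤ n := by
      have : (0:Int) ≤ n := hpre
      omega
    have hLpos := pvCeilSqrt_pos n hn1
    obtain ⟨Ln, hLn⟩ : ∃ m : Nat, pvCeilSqrt n = (m : Int) := ⟨(pvCeilSqrt n).toNat, by omega⟩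
    obtain ⟨nn, hnn⟩ : ∃ m : Nat, n = (m : Int) := ⟨n.toNat, by omega⟩
    have hLn1 : 1 ≤ Ln := by
      have : (1:Int) ≤ (Ln : Int) := hLn ▸ hLpos
      exact_mod_cast this
    have hnn1 : nn ≠ 0 := by
      intro h; apply h0; rw [hnn, h]; rfl
    rw [hLn, hnn, Int.toNat_natCast,
      pvLoopA_eq nn Ln nn hLn1 (le_refl _), pvRowsB_eq Ln nn hLn1 hnn1]
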